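-- pv_equiv track=rewrite | github.com/Dish365/fontaine_sante_scos | backend/fastapi/app/engines/quality_engine.py | _check_certifications
-- ===== SOURCE A (Python) =====
-- from typing import Dict, Any, List
--
-- def _check_certifications(certifications: List[str]) -> Dict[str, bool]:
--     required_certs = {
--         "ISO9001": False,
--         "ISO14001": False,
--         "ISO45001": False
--     }
--     for cert in certifications:
--         if cert in required_certs:
--             required_certs[cert] = True
--     return required_certs
-- ===== SOURCE B (Python) =====
-- from typing import Dict, List
--
-- REQUIRED_CERTS = ("ISO9001", "ISO14001", "ISO45001")
--
-- def _check_certifications(certifications: List[str]) -> Dict[str, bool]: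
--     have = set(certifications)
--     return {name: name in have for name in REQUIRED_CERTS}
-- ===== Notes on version B (the rewrite author's own statement) =====
-- stated objective: idiomatic
-- what changed: B reverses the traversal: instead of looping over the input and mutating a dict, it iterates over the fixed tuple of required certification names and builds the result in one dict comprehension by membership test in a set of the input.
import Mathlib
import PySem

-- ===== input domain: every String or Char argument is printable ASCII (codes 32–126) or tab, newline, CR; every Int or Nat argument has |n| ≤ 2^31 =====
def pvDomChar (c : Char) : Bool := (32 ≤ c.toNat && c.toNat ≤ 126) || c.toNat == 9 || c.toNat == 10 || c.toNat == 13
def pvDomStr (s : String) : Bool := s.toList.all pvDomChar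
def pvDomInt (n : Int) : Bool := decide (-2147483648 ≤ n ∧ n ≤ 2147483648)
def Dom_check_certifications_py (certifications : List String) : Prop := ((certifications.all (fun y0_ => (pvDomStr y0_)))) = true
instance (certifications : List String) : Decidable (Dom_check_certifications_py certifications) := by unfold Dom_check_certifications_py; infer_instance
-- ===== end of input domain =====

-- B reverses the traversal: it maps over the fixed list of required names testing membership
-- in a set of the input, instead of looping over the input and mutating a dict (idiomatic).

-- ===== PORT A =====
def check_certifications_py (certifications : List String) : List (String × Bool) :=
  let required : PySem.Dict String Bool :=
    PySem.Dict.mk [("ISO9001", false), ("ISO14001", false), ("ISO45001", false)]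
  (certifications.foldl
    (fun d cert => if d.contains cert then d.insert cert true else d) required).items

-- ===== PORT B =====
def check_certifications_py_alt (certifications : List String) : List (String × Bool) :=
  let haveSet : PySem.Set String := PySem.Set.ofList certifications
  ["ISO9001", "ISO14001", "ISO45001"].map (fun name => (name, haveSet.contains name))

-- ===== PRECONDITION & SPEC =====
def Spec_check_certifications_py (certifications : List String) (out : List (String × Bool)) : Prop := out = check_certifications_py_alt certifications
instance (certifications : List String) (out : List (String × Bool)) : Decidable (Spec_check_certifications_py certifications out) := by unfold Spec_check_certifications_py; infer_instance

-- ===== CLAIM (what is proved, stated in full; the proofs are below) =====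
def Claim_equal_check_certifications_py : Prop := ∀ (certifications : List String), Dom_check_certifications_py certifications → Spec_check_certifications_py certifications (check_certifications_py certifications)

-- ===== LEMMAS AND PROOFS =====

theorem fold_items (certs : List String) : ∀ (a b c : Bool),
    (certs.foldl (fun d cert => if d.contains cert then d.insert cert true else d)
      (PySem.Dict.mk [("ISO9001", a), ("ISO14001", b), ("ISO45001", c)])).items
    = [("ISO9001", a || certs.contains "ISO9001"),
       ("ISO14001", b || certs.contains "ISO14001"),
       ("ISO45001", c || certs.contains "ISO45001")] := by
  induction certs with
  | nil => intro a b c; simp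
  | cons x xs ih =>
    intro a b c
    by_cases h1 : x = "ISO9001"
    · subst h1
      have hins : (PySem.Dict.mk [("ISO9001", a), ("ISO14001", b), ("ISO45001", c)]).insert "ISO9001" true
          = PySem.Dict.mk [("ISO9001", true), ("ISO14001", b), ("ISO45001", c)] := by
        cases a <;> cases b <;> cases c <;> rfl
      have hcon : (PySem.Dict.mk [("ISO9001", a), ("ISO14001", b), ("ISO45001", c)]).contains "ISO9001" = true := rfl
      simp only [List.foldl_cons, hcon, if_true, hins]
      simp [ih]
    · by_cases h2 : x = "ISO14001"
      · subst h2
        have hins : (PySem.Dict.mk [("ISO9001", a), ("ISO14001", b), ("ISO45001", c)]).insert "ISO14001" true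
            = PySem.Dict.mk [("ISO9001", a), ("ISO14001", true), ("ISO45001", c)] := by
          cases a <;> cases b <;> cases c <;> rfl
        have hcon : (PySem.Dict.mk [("ISO9001", a), ("ISO14001", b), ("ISO45001", c)]).contains "ISO14001" = true := rfl
        simp only [List.foldl_cons, hcon, if_true, hins]
        simp [ih]
      · by_cases h3 : x = "ISO45001"
        · subst h3
          have hins : (PySem.Dict.mk [("ISO9001", a), ("ISO14001", b), ("ISO45001", c)]).insert "ISO45001" true
              = PySem.Dict.mk [("ISO9001", a), ("ISO14001", b), ("ISO45001", true)] := by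
            cases a <;> cases b <;> cases c <;> rfl
          have hcon : (PySem.Dict.mk [("ISO9001", a), ("ISO14001", b), ("ISO45001", c)]).contains "ISO45001" = true := rfl
          simp only [List.foldl_cons, hcon, if_true, hins]
          simp [ih]
        · have hcon : (PySem.Dict.mk [("ISO9001", a), ("ISO14001", b), ("ISO45001", c)]).contains x = false := by
            simp [PySem.Dict.contains, Ne.symm h1, Ne.symm h2, Ne.symm h3]
          simp only [List.foldl_cons, hcon, Bool.false_eq_true, if_false]
          simp [ih, Ne.symm h1, Ne.symm h2, Ne.symm h3]

-- ===== VERDICT (by name: the statement is the Claim_ definition above) =====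
theorem check_certifications_py_spec : Claim_equal_check_certifications_py := by
  intro certs _
  unfold Spec_check_certifications_py check_certifications_py check_certifications_py_alt
  simp [fold_items, PySem.Set.mem_ofList]
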